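-- pv_equiv track=rewrite | github.com/Filipcio12/Spellchecking-in-Python | lab4/main.py | hash_words
-- ===== SOURCE A (Python) =====
-- def hash_words(dictionary):
--     hash_table = {}
--     for word in dictionary:
--         c = frequent_char(word)
--         if c not in hash_table:
--             hash_table[c] = [word]
--         elif word not in hash_table[c]:
--             hash_table[c].append(word)
--     return hash_table
--
-- def frequent_char(word):
--     frequency = {}
--     for c in word:
--         if c in frequency:
--             frequency[c] += 1
--         else:
--             frequency[c] = 1
--     chars = frequency.items()
--     max_char = max(chars, key=lambda c: c[1])
--     return max_char[0]
-- ===== SOURCE B (Python) =====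
-- def frequent_char(word):
--     frequency = {}
--     for c in word:
--         if c in frequency:
--             frequency[c] += 1
--         else:
--             frequency[c] = 1
--     chars = frequency.items()
--     max_char = max(chars, key=lambda c: c[1])
--     return max_char[0]
--
--
-- def hash_words(dictionary):
--     # annotate each word once with its key
--     keyed = [(frequent_char(w), w) for w in dictionary]
--     # distinct keys in first-occurrence order
--     keys = list(dict.fromkeys(k for k, _ in keyed))
--     # for each key, its words in order, deduplicated (first occurrences)
--     return {k: list(dict.fromkeys(w for kk, w in keyed if kk == k))
--             for k in keys}
-- ===== Notes on version B (the rewrite author's own statement) =====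
-- stated objective: faster
-- what changed: A builds the result incrementally in one fold over a mutable dict with an inline O(bucket) list-membership dedup; B never folds into a dict: it annotates each word with its key, extracts the distinct keys, and builds each bucket by a per-key filtered scan of the annotated list with a hash-based dict.fromkeys dedup.
import Mathlib
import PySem

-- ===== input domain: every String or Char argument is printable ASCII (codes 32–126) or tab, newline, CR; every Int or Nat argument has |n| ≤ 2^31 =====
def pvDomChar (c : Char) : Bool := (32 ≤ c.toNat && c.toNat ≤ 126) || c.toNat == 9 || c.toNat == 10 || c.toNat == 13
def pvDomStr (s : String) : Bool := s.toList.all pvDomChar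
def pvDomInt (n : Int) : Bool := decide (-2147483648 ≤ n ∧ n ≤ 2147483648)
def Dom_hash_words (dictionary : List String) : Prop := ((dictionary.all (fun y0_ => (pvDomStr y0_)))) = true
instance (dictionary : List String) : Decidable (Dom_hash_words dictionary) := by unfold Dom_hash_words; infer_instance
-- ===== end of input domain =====

-- B never folds into a dict: it annotates each word with its key, lists the distinct keys,
-- and builds each bucket by a per-key filtered scan plus dedup; return value only.


-- ===== PORT A =====
-- shared helper (identical in Source A and Source B); on the empty word Python raises ValueError
-- (max of empty sequence) — PySem.List.max? is none there, we return "" (excluded by Pre_)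
def frequent_char (word : String) : String :=
  let frequency : PySem.Dict Char Int := word.toList.foldl
    (fun d c => if d.contains c then d.modify c 0 (· + 1) else d.insert c 1)
    PySem.Dict.empty
  match PySem.List.max? frequency.items (fun p => p.2) with
  | some p => String.ofList [p.1]
  | none => ""

def hash_words (dictionary : List String) : List (String × List String) :=
  (dictionary.foldl
    (fun (h : PySem.Dict String (List String)) word =>
      let c := frequent_char word
      if h.contains c = false then h.insert c [word]
      else if (h.getD c []).contains word = false then h.modify c [] (· ++ [word])
      else h)
    PySem.Dict.empty).items

-- ===== PORT B =====
def hash_words_alt (dictionary : List String) : List (String × List String) :=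
  let keyed := dictionary.map (fun w => (frequent_char w, w))
  let keys := PySem.List.dedup (keyed.map (fun p => p.1))
  keys.map (fun k =>
    (k, PySem.List.dedup ((keyed.filter (fun p => p.1 == k)).map (fun p => p.2))))

-- ===== PRECONDITION & SPEC =====
-- Pre_ excludes dictionaries containing the empty word, on which Python A raises
-- ValueError in frequent_char (max() of an empty sequence); B raises there too.
def Pre_hash_words (dictionary : List String) : Prop := ∀ w ∈ dictionary, w ≠ ""
instance (dictionary : List String) : Decidable (Pre_hash_words dictionary) := by unfold Pre_hash_words; infer_instance

def pvWitness_hash_words : List String := ["ab", "ba", "ab", "cc", "a!b"]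

def Spec_hash_words (dictionary : List String) (out : List (String × List String)) : Prop := out = hash_words_alt dictionary
instance (dictionary : List String) (out : List (String × List String)) : Decidable (Spec_hash_words dictionary out) := by unfold Spec_hash_words; infer_instance

-- ===== CLAIM (what is proved, stated in full; the proofs are below) =====
def Claim_equal_hash_words : Prop := ∀ (dictionary : List String), Dom_hash_words dictionary → Pre_hash_words dictionary → Spec_hash_words dictionary (hash_words dictionary)

-- ===== LEMMAS AND PROOFS =====

-- A's loop body, named for the proofs (definitionally the fold body above)
def pvStepA (h : PySem.Dict String (List String)) (word : String) : PySem.Dict String (List String) :=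
  let c := frequent_char word
  if h.contains c = false then h.insert c [word]
  else if (h.getD c []).contains word = false then h.modify c [] (· ++ [word])
  else h

-- the three pieces of B, named
def pvKeyed (ws : List String) : List (String × String) := ws.map (fun w => (frequent_char w, w))
def pvKeys (ws : List String) : List String := PySem.List.dedup ((pvKeyed ws).map (fun p => p.1))
def pvWords (ws : List String) (k : String) : List String :=
  ((pvKeyed ws).filter (fun p => p.1 == k)).map (fun p => p.2)
def pvSpec (ws : List String) : List (String × List String) :=
  (pvKeys ws).map (fun k => (k, PySem.List.dedup (pvWords ws k)))

theorem pvAlt_eq (ws : List String) : hash_words_alt ws = pvSpec ws := rfl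

theorem pvKeys_nodup (ws : List String) : (pvKeys ws).Nodup := by
  simp only [pvKeys, PySem.List.dedup_eq_ofList]
  exact PySem.Set.nodup_ofList _

theorem pvMem_keys (ws : List String) (c : String) :
    c ∈ pvKeys ws ↔ c ∈ (pvKeyed ws).map (fun p => p.1) := by
  simp [pvKeys]

theorem pvSpec_keys (ws : List String) :
    (PySem.Dict.mk (pvSpec ws)).keys = pvKeys ws := by
  simp [PySem.Dict.keys, pvSpec, List.map_map, Function.comp_def]

theorem pvContains_spec (ws : List String) (c : String) :
    (PySem.Dict.mk (pvSpec ws)).contains c = decide (c ∈ pvKeys ws) := by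
  rw [PySem.Dict.contains_eq_decide_mem_keys, pvSpec_keys]

theorem pvGetD_spec (ws : List String) (c : String) (h : c ∈ pvKeys ws) :
    (PySem.Dict.mk (pvSpec ws)).getD c [] = PySem.List.dedup (pvWords ws c) := by
  apply PySem.Dict.getD_of_mem_items
  · exact List.mem_map.mpr ⟨c, h, rfl⟩
  · rw [pvSpec_keys]; exact pvKeys_nodup ws

theorem pvKeyed_append (ws : List String) (w : String) :
    pvKeyed (ws ++ [w]) = pvKeyed ws ++ [(frequent_char w, w)] := by
  simp [pvKeyed]

theorem pvWords_append (ws : List String) (w k : String) :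
    pvWords (ws ++ [w]) k
      = pvWords ws k ++ (if frequent_char w = k then [w] else []) := by
  simp only [pvWords, pvKeyed_append, List.filter_append, List.map_append]
  congr 1
  by_cases h : frequent_char w = k <;> simp [h]

theorem pvKeys_append (ws : List String) (w : String) :
    pvKeys (ws ++ [w])
      = if frequent_char w ∈ pvKeys ws then pvKeys ws
        else pvKeys ws ++ [frequent_char w] := by
  simp only [pvKeys, pvKeyed_append, List.map_append, PySem.List.dedup_eq_ofList,
    List.map_cons, List.map_nil]
  rw [PySem.Set.ofList_append_singleton, PySem.Set.add_eq_ite]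

theorem pvWords_nil_of_not_mem (ws : List String) (c : String) (h : ¬ c ∈ pvKeys ws) :
    pvWords ws c = [] := by
  rw [pvMem_keys] at h
  simp only [pvWords, List.map_eq_nil_iff, List.filter_eq_nil_iff]
  intro p hp hpc
  exact h (List.mem_map.mpr ⟨p, hp, by simpa using hpc⟩)

theorem pvOfList_mem_append (l : List String) (w : String) (h : w ∈ l) :
    PySem.Set.ofList (l ++ [w]) = PySem.Set.ofList l := by
  rw [PySem.Set.ofList_append_singleton]
  exact PySem.Set.add_of_mem (by simp [PySem.Set.mem_ofList, h])

theorem pvOfList_not_mem_append (l : List String) (w : String) (h : ¬ w ∈ l) :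
    PySem.Set.ofList (l ++ [w]) = PySem.Set.ofList l ++ [w] := by
  rw [PySem.Set.ofList_append_singleton]
  exact PySem.Set.add_of_not_mem (by simp [PySem.Set.mem_ofList, h])

-- one loop step of A, run on B's result for the prefix, yields B's result for one more word
theorem pvStep_spec (ws : List String) (w : String) :
    (pvStepA (PySem.Dict.mk (pvSpec ws)) w).items = pvSpec (ws ++ [w]) := by
  simp only [pvStepA]
  set c := frequent_char w with hc
  by_cases hmem : c ∈ pvKeys ws
  · rw [pvContains_spec, if_neg (by simp [hmem])]
    rw [pvGetD_spec ws c hmem]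
    by_cases hw : w ∈ pvWords ws c
    · -- duplicate word: A leaves the dict alone, B's bucket dedups it away
      have hw' : w ∈ PySem.List.dedup (pvWords ws c) := by
        rw [PySem.List.mem_dedup]; exact hw
      have hcw : (PySem.List.dedup (pvWords ws c)).contains w = true := by simpa using hw'
      rw [if_neg (by simp [hw])]
      show pvSpec ws = pvSpec (ws ++ [w])
      simp only [pvSpec, pvKeys_append, ← hc, if_pos hmem]
      apply List.map_congr_left
      intro k hk
      rw [pvWords_append, ← hc]
      by_cases hkc : c = k
      · subst hkc
        simp [PySem.List.dedup_eq_ofList, pvOfList_mem_append _ _ hw]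
      · simp [hkc]
    · -- new word in an existing bucket: A appends, B's bucket gains w at the end
      have hw' : ¬ w ∈ PySem.List.dedup (pvWords ws c) := by
        rw [PySem.List.mem_dedup]; exact hw
      have hcw : (PySem.List.dedup (pvWords ws c)).contains w = false := by simpa using hw'
      rw [if_pos hcw]
      rw [show (PySem.Dict.mk (pvSpec ws)).modify c [] (· ++ [w])
            = (PySem.Dict.mk (pvSpec ws)).insert c
                ((PySem.Dict.mk (pvSpec ws)).getD c [] ++ [w]) from rfl]
      rw [pvGetD_spec ws c hmem]
      rw [PySem.Dict.items_insert, pvContains_spec, if_pos (by simp [hmem])]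
      simp only [pvSpec, pvKeys_append, ← hc, if_pos hmem, List.map_map]
      apply List.map_congr_left
      intro k hk
      rw [pvWords_append, ← hc]
      by_cases hkc : k = c
      · subst hkc
        simp [PySem.List.dedup_eq_ofList, pvOfList_not_mem_append _ _ hw]
      · have hb : (k == c) = false := by simp [hkc]
        have hck : ¬ c = k := fun h => hkc h.symm
        simp [hck, hkc]
  · -- new key: A appends a fresh entry, B gains a new key at the end
    rw [pvContains_spec, if_pos (by simp [hmem])]
    rw [PySem.Dict.items_insert, pvContains_spec, if_neg (by simp [hmem])]
    simp only [pvSpec, pvKeys_append, ← hc, if_neg hmem, List.map_append]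
    congr 1
    · apply List.map_congr_left
      intro k hk
      rw [pvWords_append, ← hc]
      have hkc : ¬ c = k := fun h => hmem (h ▸ hk)
      simp [hkc]
    · rw [show ([c].map fun k => (k, PySem.List.dedup (pvWords (ws ++ [w]) k)))
            = [(c, PySem.List.dedup (pvWords (ws ++ [w]) c))] from rfl]
      rw [pvWords_append, ← hc, pvWords_nil_of_not_mem ws c hmem]
      have h1 : PySem.Set.ofList [w] = [w] := PySem.Set.ofList_eq_self_of_nodup [w] (List.nodup_singleton w)
      simp [h1]

theorem pvFold (ws : List String) :
    (ws.foldl pvStepA PySem.Dict.empty).items = pvSpec ws := by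
  induction ws using List.reverseRecOn with
  | nil => simp [pvSpec, pvKeys, pvKeyed, PySem.List.dedup]; rfl
  | append_singleton ws w ih =>
    rw [List.foldl_append, List.foldl_cons, List.foldl_nil]
    have : ws.foldl pvStepA PySem.Dict.empty = PySem.Dict.mk (pvSpec ws) :=
      PySem.Dict.ext ih
    rw [this, pvStep_spec]

-- ===== VERDICT (by name: the statement is the Claim_ definition above) =====
theorem hash_words_spec : Claim_equal_hash_words := by
  intro dictionary _ _
  unfold Spec_hash_words
  rw [pvAlt_eq]
  have h : hash_words dictionary = (dictionary.foldl pvStepA PySem.Dict.empty).items := rfl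
  rw [h, pvFold]
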